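-- pv_equiv track=rewrite | github.com/KarolinaPSouza/dataset-pesquisa | 1091-Concert_Tickets/3294228.py | concert_tickets
-- ===== SOURCE A (Python) =====
-- import bisect
--
-- def concert_tickets(ticket_price: int, max_customer_price: int) -> int:
--     """
--     """
--     def upper_bound(search_list: list, search: int) -> int:
--         low, high = 0, len(search_list)
--         while low + 1 < high:
--             mid = (low + high) // 2
--             if search_list[mid] <= search:
--                 low = mid
--             else:
--                 high = mid
--         return low + 1
--
--     ticket_price.sort()
--     next_avail, i = [i for i in range(len(ticket_price) + 1)], 0
--     ticket_purchased = [-1]*len(max_customer_price)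
--     for idx, ticket in enumerate(max_customer_price):
--         index = i = bisect.bisect_right(ticket_price, ticket)
--         while i != next_avail[i]:
--             i = next_avail[i]
--         while index != i:
--             next_avail[index], index = i, next_avail[index]
--         if i:
--             next_avail[i] = i - 1
--             ticket_purchased[idx] = ticket_price[i - 1]
--     return ticket_purchased
-- ===== SOURCE B (Python) =====
-- import bisect
--
-- def concert_tickets(ticket_price: int, max_customer_price: int) -> int:
--     """Shrinking sorted pool: for each customer, bisect for the best ticket <= their
--     price and delete it from the pool (instead of a union-find next-available array)."""
--     ticket_price.sort()
--     avail = list(ticket_price)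
--     result = []
--     for price in max_customer_price:
--         j = bisect.bisect_right(avail, price)
--         if j > 0:
--             result.append(avail[j - 1])
--             del avail[j - 1]
--         else:
--             result.append(-1)
--     return result
-- ===== Notes on version B (the rewrite author's own statement) =====
-- stated objective: simpler
-- what changed: Replaces the union-find next-available array with path compression by a shrinking sorted pool: bisect the sorted tickets per customer and delete the chosen ticket, appending results instead of writing into a preallocated slot array.
import Mathlib
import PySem

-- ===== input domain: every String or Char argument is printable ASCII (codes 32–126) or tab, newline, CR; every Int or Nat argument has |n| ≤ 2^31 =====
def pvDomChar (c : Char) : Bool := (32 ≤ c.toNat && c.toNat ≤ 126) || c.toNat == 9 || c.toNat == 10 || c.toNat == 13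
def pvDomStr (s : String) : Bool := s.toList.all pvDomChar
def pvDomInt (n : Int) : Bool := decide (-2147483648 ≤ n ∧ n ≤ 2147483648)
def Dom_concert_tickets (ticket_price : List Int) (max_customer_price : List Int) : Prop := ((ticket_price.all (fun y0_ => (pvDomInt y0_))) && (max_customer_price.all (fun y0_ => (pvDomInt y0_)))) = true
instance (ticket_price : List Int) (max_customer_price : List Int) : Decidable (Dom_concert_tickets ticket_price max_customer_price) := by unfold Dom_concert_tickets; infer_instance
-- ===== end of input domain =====

-- B replaces A's union-find next-available array by a shrinking sorted pool (bisect + delete); simpler decomposition, same return value.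
-- Both A and B sort ticket_price in place; the equivalence proved here is about the RETURN value (both perform the same sort mutation).

-- ===== PORT A =====
-- `while i != next_avail[i]: i = next_avail[i]`  (all indices stay in range and nonnegative in
-- every real run, so list reads are ported with getD; fuel = len(next_avail) bounds the strictly
-- decreasing pointer chase, which Python's loop always finishes within)
def chaseA (na : List Nat) : Nat → Nat → Nat
  | 0, i => i
  | f + 1, i => let p := na.getD i 0; if p = i then i else chaseA na f p

-- `while index != i: next_avail[index], index = i, next_avail[index]`  (reads the old value first)
def compressA (na : List Nat) : Nat → Nat → Nat → List Nat
  | 0, _, _ => na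
  | f + 1, index, i =>
      if index = i then na
      else
        let nxt := na.getD index 0
        compressA (na.set index i) f nxt i

-- `for idx, ticket in enumerate(max_customer_price): …`
def loopA (ts : List Int) : List (Int × Int) → List Nat → List Int → List Int
  | [], _, res => res
  | (idx, ticket) :: rest, na, res =>
      let index := PySem.List.bisectRight ts ticket
      let i := chaseA na na.length index
      let na1 := compressA na na.length index i
      if i ≠ 0 then
        loopA ts rest (na1.set i (i - 1)) (res.set idx.toNat (ts.getD (i - 1) 0))
      else
        loopA ts rest na1 res

def concert_tickets (ticket_price : List Int) (max_customer_price : List Int) : List Int :=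
  let ts := PySem.List.sorted ticket_price (fun x => x)
  loopA ts (PySem.List.enumerate max_customer_price)
    (List.range (ts.length + 1)) (List.replicate max_customer_price.length (-1))

-- ===== PORT B =====
-- `for price in max_customer_price: j = bisect_right(avail, price); …`  (avail[j-1] / del avail[j-1]
-- always in range since 0 < j ≤ len(avail); ported with getD / eraseIdx)
def loopB : List Int → List Int → List Int → List Int
  | _, [], acc => acc
  | avail, price :: rest, acc =>
      let j := PySem.List.bisectRight avail price
      if 0 < j then
        loopB (avail.eraseIdx (j - 1)) rest (acc ++ [avail.getD (j - 1) 0])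
      else
        loopB avail rest (acc ++ [-1])

def concert_tickets_alt (ticket_price : List Int) (max_customer_price : List Int) : List Int :=
  let ts := PySem.List.sorted ticket_price (fun x => x)
  loopB ts max_customer_price []

-- ===== PRECONDITION & SPEC =====
def Spec_concert_tickets (ticket_price : List Int) (max_customer_price : List Int) (out : List Int) : Prop := out = concert_tickets_alt ticket_price max_customer_price
instance (ticket_price : List Int) (max_customer_price : List Int) (out : List Int) : Decidable (Spec_concert_tickets ticket_price max_customer_price out) := by unfold Spec_concert_tickets; infer_instance

-- ===== CLAIM (what is proved, stated in full; the proofs are below) =====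
def Claim_equal_concert_tickets : Prop := ∀ (ticket_price : List Int) (max_customer_price : List Int), Dom_concert_tickets ticket_price max_customer_price → Spec_concert_tickets ticket_price max_customer_price (concert_tickets ticket_price max_customer_price)

-- ===== LEMMAS AND PROOFS =====

-- `maxBelow S j` = the largest available index ≤ j (0 if none); S = currently available positions.
def maxBelow (S : List Nat) (j : Nat) : Nat :=
  S.foldr (fun k m => if k ≤ j then max k m else m) 0

-- Invariant tying A's next-available array to the set S of available positions.
def GoodNA (n : Nat) (na : List Nat) (S : List Nat) : Prop :=
  na.length = n + 1 ∧
  ∀ j, j ≤ n →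
    na.getD j 0 ≤ j ∧
    maxBelow S (na.getD j 0) = maxBelow S j ∧
    (na.getD j 0 = j ↔ (j ∈ S ∨ j = 0))

theorem mb_le (S : List Nat) (j : Nat) : maxBelow S j ≤ j := by
  induction S with
  | nil => simp [maxBelow]
  | cons k S ih =>
      simp only [maxBelow, List.foldr] at *
      split <;> omega

theorem mb_mem (S : List Nat) (j : Nat) : maxBelow S j = 0 ∨ maxBelow S j ∈ S := by
  induction S with
  | nil => simp [maxBelow]
  | cons k S ih =>
      simp only [maxBelow, List.foldr] at *
      split
      · rcases max_choice k (List.foldr (fun k m => if k ≤ j then max k m else m) 0 S) with hm | hm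
        · rw [hm]; right; simp
        · rw [hm]
          rcases ih with h | h
          · left; exact h
          · right; simp [h]
      · rcases ih with h | h
        · left; exact h
        · right; simp [h]

theorem mb_ge (S : List Nat) (j k : Nat) (hk : k ∈ S) (hkj : k ≤ j) : k ≤ maxBelow S j := by
  induction S with
  | nil => simp at hk
  | cons a S ih =>
      simp only [maxBelow, List.foldr] at *
      rcases List.mem_cons.1 hk with h | h
      · subst h; rw [if_pos hkj]; omega
      · have := ih h
        split <;> omega

theorem mb_mono (S : List Nat) (p j : Nat) (h : p ≤ j) : maxBelow S p ≤ maxBelow S j := by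
  induction S with
  | nil => simp [maxBelow]
  | cons a S ih =>
      simp only [maxBelow, List.foldr] at *
      split
      · have : a ≤ j := by omega
        simp [this]; omega
      · split <;> omega

theorem mb_zero (S : List Nat) (hpos : ∀ k ∈ S, 1 ≤ k) : maxBelow S 0 = 0 := by
  induction S with
  | nil => simp [maxBelow]
  | cons a S ih =>
      have ha := hpos a (by simp)
      simp only [maxBelow, List.foldr] at *
      rw [if_neg (by omega)]
      exact ih (fun k hk => hpos k (by simp [hk]))

theorem mb_eq_zero_of_forall_gt (S : List Nat) (j : Nat) (h : ∀ k ∈ S, j < k) :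
    maxBelow S j = 0 := by
  induction S with
  | nil => simp [maxBelow]
  | cons a S ih =>
      have ha := h a (by simp)
      simp only [maxBelow, List.foldr] at *
      rw [if_neg (by omega)]
      exact ih (fun k hk => h k (by simp [hk]))

theorem mb_self_of_mem (S : List Nat) (j : Nat) (hj : j ∈ S) : maxBelow S j = j :=
  Nat.le_antisymm (mb_le S j) (mb_ge S j j hj le_rfl)

theorem mb_idem (S : List Nat) (j : Nat) (hpos : ∀ k ∈ S, 1 ≤ k) :
    maxBelow S (maxBelow S j) = maxBelow S j := by
  rcases mb_mem S j with h | h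
  · rw [h, mb_zero S hpos]
  · exact mb_self_of_mem S _ h

theorem mb_pred (S : List Nat) (i : Nat) (hi : i ∉ S) (h1 : 1 ≤ i) :
    maxBelow S (i - 1) = maxBelow S i := by
  induction S with
  | nil => simp [maxBelow]
  | cons a S ih =>
      have hane : a ≠ i := by intro h; exact hi (by simp [h])
      have hrec := ih (fun h => hi (by simp [h]))
      simp only [maxBelow, List.foldr] at *
      by_cases hcase : a ≤ i - 1
      · have : a ≤ i := by omega
        simp [hcase, this, hrec]
      · have : ¬ a ≤ i := by omega
        simp [hcase, this, hrec]

theorem mb_erase (S : List Nat) (i p j : Nat) (hpj : p ≤ j)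
    (h : maxBelow S p = maxBelow S j) :
    maxBelow (S.erase i) p = maxBelow (S.erase i) j := by
  refine Nat.le_antisymm (mb_mono _ _ _ hpj) ?_
  rcases mb_mem (S.erase i) j with h0 | hm
  · omega
  · have hle : maxBelow (S.erase i) j ≤ j := mb_le _ _
    have hmemS : maxBelow (S.erase i) j ∈ S := List.erase_subset hm
    have h1 : maxBelow (S.erase i) j ≤ maxBelow S j := mb_ge S j _ hmemS hle
    have h2 : maxBelow (S.erase i) j ≤ p := by
      have := mb_le S p; omega
    exact mb_ge _ p _ hm h2

-- getD after set
theorem getD_set_self (na : List Nat) (a v : Nat) (h : a < na.length) :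
    (na.set a v).getD a 0 = v := by
  simp [List.getD_eq_getElem?_getD, h]

theorem getD_set_ne (na : List Nat) (a v j : Nat) (h : j ≠ a) :
    (na.set a v).getD j 0 = na.getD j 0 := by
  simp [List.getD_eq_getElem?_getD, List.getElem?_set_ne (by omega : a ≠ j)]

theorem good_set_compress (n : Nat) (na S : List Nat) (index i : Nat)
    (hg : GoodNA n na S) (hpos : ∀ k ∈ S, 1 ≤ k)
    (hidx : index ≤ n) (hi : maxBelow S index = i) (hne : index ≠ i) :
    GoodNA n (na.set index i) S := by
  obtain ⟨hlen, hg⟩ := hg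
  have hlt : index < na.length := by omega
  refine ⟨by simp [hlen], fun j hj => ?_⟩
  by_cases hcase : j = index
  · subst hcase
    rw [getD_set_self na _ _ hlt]
    have hile : i ≤ j := hi ▸ mb_le S j
    refine ⟨hile, ?_, ?_⟩
    · rw [← hi, mb_idem S j hpos]
    · constructor
      · intro h; omega
      · rintro (h | h)
        · have := mb_self_of_mem S j h; omega
        · subst h
          have := mb_zero S hpos; omega
  · rw [getD_set_ne na _ _ _ hcase]
    exact hg j hj

theorem good_compress (n : Nat) (S : List Nat) (hpos : ∀ k ∈ S, 1 ≤ k) :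
    ∀ (fuel : Nat) (na : List Nat) (index i : Nat),
    GoodNA n na S → index ≤ n → maxBelow S index = i →
    GoodNA n (compressA na fuel index i) S := by
  intro fuel
  induction fuel with
  | zero => intro na index i hg _ _; exact hg
  | succ f ih =>
      intro na index i hg hidx hi
      by_cases hcase : index = i
      · simpa [compressA, hcase] using hg
      · have hg' := good_set_compress n na S index i hg hpos hidx hi hcase
        have hstep := hg.2 index hidx
        have hnxt : maxBelow S (na.getD index 0) = i := by rw [hstep.2.1, hi]
        have hnxtle : na.getD index 0 ≤ n := le_trans hstep.1 hidx
        simpa [compressA, hcase] using ih (na.set index i) (na.getD index 0) i hg' hnxtle hnxt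

theorem chase_spec (n : Nat) (na S : List Nat) (hg : GoodNA n na S)
    (hpos : ∀ k ∈ S, 1 ≤ k) :
    ∀ (fuel j : Nat), j ≤ n → j < fuel → chaseA na fuel j = maxBelow S j := by
  intro fuel
  induction fuel with
  | zero => intro j _ h; omega
  | succ f ih =>
      intro j hj hjf
      have hstep := hg.2 j hj
      by_cases hcase : na.getD j 0 = j
      · have : j ∈ S ∨ j = 0 := hstep.2.2.1 hcase
        have hmb : maxBelow S j = j := by
          rcases this with h | h
          · exact mb_self_of_mem S j h
          · subst h; exact mb_zero S hpos
        simp only [chaseA]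
        rw [if_pos hcase, hmb]
      · have hlt : na.getD j 0 < j := lt_of_le_of_ne hstep.1 hcase
        have := ih (na.getD j 0) (by omega) (by omega)
        simp only [chaseA, hcase, if_false]
        rw [this, hstep.2.1]

theorem good_sell (n : Nat) (na S : List Nat) (i : Nat)
    (hg : GoodNA n na S) (hS : S.Pairwise (· < ·)) (hpos : ∀ k ∈ S, 1 ≤ k)
    (hmem : i ∈ S) (hin : i ≤ n) :
    GoodNA n (na.set i (i - 1)) (S.erase i) := by
  obtain ⟨hlen, hgg⟩ := hg
  have hnodup : S.Nodup := hS.imp (fun h => Nat.ne_of_lt h)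
  have h1i : 1 ≤ i := hpos i hmem
  have hnotmem : i ∉ S.erase i := hnodup.not_mem_erase
  refine ⟨by simp [hlen], fun j hj => ?_⟩
  by_cases hcase : j = i
  · subst hcase
    rw [getD_set_self na _ _ (by omega)]
    refine ⟨by omega, mb_pred _ _ hnotmem h1i, ?_⟩
    constructor
    · intro h; omega
    · rintro (h | h)
      · exact absurd h hnotmem
      · omega
  · rw [getD_set_ne na _ _ _ hcase]
    have hstep := hgg j hj
    refine ⟨hstep.1, mb_erase S i _ _ hstep.1 hstep.2.1, ?_⟩
    rw [hstep.2.2]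
    have : j ∈ S.erase i ↔ j ∈ S := by
      constructor
      · exact fun h => List.erase_subset h
      · intro h; exact (List.mem_erase_of_ne hcase).2 h
    rw [this]

-- sortedness of ts transported along getD
theorem ts_getD_mono (ts : List Int) (hts : ts.Pairwise (· ≤ ·)) (a b : Nat)
    (hab : a ≤ b) (hb : b < ts.length) : ts.getD a 0 ≤ ts.getD b 0 := by
  rcases Nat.lt_or_ge a b with h | h
  · have := (List.pairwise_iff_getElem.1 hts) a b (by omega) hb h
    rwa [List.getD_eq_getElem _ _ (by omega), List.getD_eq_getElem _ _ hb]
  · have : a = b := by omega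
    subst this; rfl

-- erase of the m-th element of a nodup list is eraseIdx m
theorem erase_getD_eq_eraseIdx (S : List Nat) (m : Nat) :
    S.Nodup → m < S.length → S.erase (S.getD m 0) = S.eraseIdx m := by
  induction S generalizing m with
  | nil => intro _ h; simp at h
  | cons a S ih =>
      intro hnd hm
      cases m with
      | zero => simp [List.getD]
      | succ m =>
          have hm' : m < S.length := by simpa using hm
          have hmem : S.getD m 0 ∈ S := by
            rw [List.getD_eq_getElem _ _ hm']; exact List.getElem_mem hm'
          have hane : a ≠ S.getD m 0 := by
            intro h; rw [h] at hnd; exact (List.nodup_cons.1 hnd).1 hmem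
          have := ih m (List.nodup_cons.1 hnd).2 hm'
          rw [List.getD_cons_succ, List.eraseIdx_cons_succ,
            List.erase_cons_tail (by simpa using hane), this]

-- the heart of the B-side: what bisect_right over the mapped pool computes
theorem loopB_acc (mc : List Int) : ∀ (avail acc : List Int),
    loopB avail mc acc = acc ++ loopB avail mc [] := by
  induction mc with
  | nil => intro avail acc; simp [loopB]
  | cons p rest ih =>
      intro avail acc
      simp only [loopB]
      split
      · rw [ih _ (acc ++ _), ih _ ([] ++ _)]
        simp
      · rw [ih _ (acc ++ _), ih _ ([] ++ _)]
        simp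

theorem set_append_replicate (done : List Int) (r : Nat) (v : Int) :
    (done ++ (-1 : Int) :: List.replicate r (-1)).set done.length v
      = (done ++ [v]) ++ List.replicate r (-1) := by
  rw [List.set_append_right _ _ (le_refl done.length)]
  simp

theorem S_getElem_mono (S : List Nat) (hS : S.Pairwise (· < ·)) (a b : Nat)
    (hab : a ≤ b) (hb : b < S.length) : S[a]'(by omega) ≤ S[b] := by
  rcases Nat.lt_or_ge a b with h | h
  · exact Nat.le_of_lt ((List.pairwise_iff_getElem.1 hS) a b (by omega) hb h)
  · have : a = b := by omega
    subst this; rfl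

theorem getD_map_f (S : List Nat) (f : Nat → Int) (m : Nat) (hm : m < S.length) :
    (S.map f).getD m 0 = f (S.getD m 0) := by
  rw [List.getD_eq_getElem _ _ (by simpa using hm), List.getD_eq_getElem _ _ hm,
    List.getElem_map]

-- WHAT BISECT COMPUTES ON BOTH SIDES: c = bisect over the pool locates exactly
-- i = maxBelow S j, the index A's union-find chase returns.
theorem step_core (ts : List Int) (hts : ts.Pairwise (· ≤ ·)) (S : List Nat)
    (hS : S.Pairwise (· < ·)) (hr : ∀ k ∈ S, 1 ≤ k ∧ k ≤ ts.length) (p : Int) :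
    (PySem.List.bisectRight (S.map (fun k => ts.getD (k - 1) 0)) p = 0 →
      maxBelow S (PySem.List.bisectRight ts p) = 0) ∧
    (0 < PySem.List.bisectRight (S.map (fun k => ts.getD (k - 1) 0)) p →
      PySem.List.bisectRight (S.map (fun k => ts.getD (k - 1) 0)) p - 1 < S.length ∧
      maxBelow S (PySem.List.bisectRight ts p)
        = S.getD (PySem.List.bisectRight (S.map (fun k => ts.getD (k - 1) 0)) p - 1) 0) := by
  obtain ⟨hjle, hpre, hsuf⟩ := PySem.List.bisectRight_spec ts p hts
  set j := PySem.List.bisectRight ts p with hjdef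
  set f : Nat → Int := fun k => ts.getD (k - 1) 0 with hfdef
  have key : ∀ k, 1 ≤ k → k ≤ ts.length → (f k ≤ p ↔ k ≤ j) := by
    intro k h1 h2
    constructor
    · intro h
      by_contra hlt
      have hk1 : k - 1 < ts.length := by omega
      have := hsuf (k - 1) hk1 (by omega)
      simp only [hfdef] at h
      rw [List.getD_eq_getElem _ _ hk1] at h
      omega
    · intro h
      have hk1 : k - 1 < ts.length := by omega
      have := hpre (k - 1) hk1 (by omega)
      simp only [hfdef]
      rw [List.getD_eq_getElem _ _ hk1]
      exact this
  have havs : (S.map f).Pairwise (· ≤ ·) := by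
    rw [List.pairwise_map]
    refine List.Pairwise.imp_of_mem ?_ hS
    intro a b ha hb hab
    exact ts_getD_mono ts hts (a - 1) (b - 1) (by omega) (by have := (hr b hb).2; have := (hr b hb).1; omega)
  obtain ⟨hcle, hcpre, hcsuf⟩ := PySem.List.bisectRight_spec (S.map f) p havs
  set c := PySem.List.bisectRight (S.map f) p with hcdef
  rw [List.length_map] at hcle
  constructor
  · intro hc0
    apply mb_eq_zero_of_forall_gt
    intro k hk
    obtain ⟨idx, hidx, hkeq⟩ := List.mem_iff_getElem.1 hk
    have hsufi := hcsuf idx (by simpa using hidx) (by omega)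
    rw [List.getElem_map] at hsufi
    have hkk := hr k hk
    by_contra hnot
    have hfk : f k ≤ p := (key k hkk.1 hkk.2).2 (by omega)
    rw [← hkeq] at hfk
    omega
  · intro hcpos
    have hc1 : c - 1 < S.length := by omega
    refine ⟨hc1, ?_⟩
    have hprec := hcpre (c - 1) (by simpa using hc1) (by omega)
    rw [List.getElem_map] at hprec
    have hmmem : S[c-1] ∈ S := List.getElem_mem hc1
    have hmle : S[c-1] ≤ j := (key _ (hr _ hmmem).1 (hr _ hmmem).2).1 hprec
    have hub : maxBelow S j ≤ S[c-1] := by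
      rcases mb_mem S j with h0 | hm
      · omega
      · obtain ⟨idx, hidx, hkeq⟩ := List.mem_iff_getElem.1 hm
        rcases Nat.lt_or_ge idx c with hlt | hge
        · have := S_getElem_mono S hS idx (c - 1) (by omega) hc1
          omega
        · have := hcsuf idx (by simpa using hidx) hge
          rw [List.getElem_map] at this
          have hkk := hr _ hm
          have hgt : ¬ S[idx] ≤ j := by
            intro hle
            have := (key S[idx] (by rw [hkeq]; exact hkk.1) (by rw [hkeq]; exact hkk.2)).2 hle
            omega
          have := mb_le S j
          omega
    have hlb : S[c-1] ≤ maxBelow S j := mb_ge S j _ hmmem hmle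
    rw [List.getD_eq_getElem _ _ hc1]
    omega

-- MAIN INDUCTION: A's loop over the union-find state equals B's loop over the sorted pool.
theorem loop_eq (ts : List Int) (hts : ts.Pairwise (· ≤ ·)) :
    ∀ (mc : List Int) (na S : List Nat) (done : List Int),
    GoodNA ts.length na S → S.Pairwise (· < ·) → (∀ k ∈ S, 1 ≤ k ∧ k ≤ ts.length) →
    loopA ts (PySem.List.enumerate mc (done.length : Int)) na
        (done ++ List.replicate mc.length (-1))
      = done ++ loopB (S.map (fun k => ts.getD (k - 1) 0)) mc [] := by
  intro mc
  induction mc with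
  | nil =>
      intro na S done hg hS hr
      simp [PySem.List.enumerate, loopA, loopB]
  | cons p rest ih =>
      intro na S done hg hS hr
      have hpos : ∀ k ∈ S, 1 ≤ k := fun k hk => (hr k hk).1
      have hlen : na.length = ts.length + 1 := hg.1
      set f : Nat → Int := fun k => ts.getD (k - 1) 0 with hfdef
      have hstep := step_core ts hts S hS hr p
      rw [← hfdef] at hstep
      rw [PySem.List.enumerate_cons]
      simp only [loopA, loopB, List.length_cons]
      set j := PySem.List.bisectRight ts p with hjdef
      set c := PySem.List.bisectRight (S.map f) p with hcdef
      have hjn : j ≤ ts.length := (PySem.List.bisectRight_spec ts p hts).1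
      have hchase : chaseA na na.length j = maxBelow S j :=
        chase_spec ts.length na S hg hpos na.length j hjn (by omega)
      have hg1 : GoodNA ts.length (compressA na na.length j (maxBelow S j)) S :=
        good_compress ts.length S hpos na.length na j (maxBelow S j) hg hjn rfl
      rw [hchase]
      rcases Nat.eq_zero_or_pos c with hc0 | hcpos
      · have hi0 : maxBelow S j = 0 := hstep.1 hc0
        rw [hi0] at hg1 ⊢
        rw [if_neg (by omega : ¬ (0 < c)), if_neg (by simp : ¬ (0 : Nat) ≠ 0)]
        have hrep : List.replicate (rest.length + 1) (-1 : Int) = -1 :: List.replicate rest.length (-1) := rfl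
        rw [hrep]
        have hgrp : done ++ (-1 : Int) :: List.replicate rest.length (-1)
            = (done ++ [-1]) ++ List.replicate rest.length (-1) := by simp
        rw [hgrp]
        have hcast : ((done.length : Int) + 1) = (((done ++ [(-1 : Int)]).length : Int)) := by
          simp
        rw [hcast, ih _ S _ hg1 hS hr, loopB_acc rest (S.map f) ([] ++ [-1])]
        simp
      · obtain ⟨hc1, hieq⟩ := hstep.2 hcpos
        set i := maxBelow S j with hidef
        have himem : i ∈ S := by
          rw [hieq]
          rw [List.getD_eq_getElem _ _ hc1]
          exact List.getElem_mem hc1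
        have hi1 : 1 ≤ i := hpos i himem
        have hin : i ≤ ts.length := (hr i himem).2
        have hnodup : S.Nodup := hS.imp (fun h => Nat.ne_of_lt h)
        rw [if_pos hcpos, if_pos (by omega : i ≠ 0)]
        -- the written value agrees
        have hval : (S.map f).getD (c - 1) 0 = ts.getD (i - 1) 0 := by
          rw [getD_map_f S f (c - 1) hc1, ← hieq]
        -- the shrunken pool agrees
        have hpool : (S.map f).eraseIdx (c - 1) = (S.erase i).map f := by
          rw [List.eraseIdx_map, hieq, erase_getD_eq_eraseIdx S (c - 1) hnodup hc1]
        -- the result list: writing at slot done.length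
        have htonat : ((done.length : Int)).toNat = done.length := by simp
        have hres : (done ++ List.replicate (rest.length + 1) (-1 : Int)).set
              ((done.length : Int)).toNat (ts.getD (i - 1) 0)
            = (done ++ [ts.getD (i - 1) 0]) ++ List.replicate rest.length (-1) := by
          rw [htonat]
          have : List.replicate (rest.length + 1) (-1 : Int) = -1 :: List.replicate rest.length (-1) := rfl
          rw [this, set_append_replicate]
        rw [hres]
        -- invariants for the next round
        have hg2 : GoodNA ts.length ((compressA na na.length j i).set i (i - 1)) (S.erase i) :=
          good_sell ts.length _ S i hg1 hS hpos himem hin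
        have hS' : (S.erase i).Pairwise (· < ·) := hS.sublist (List.erase_sublist)
        have hr' : ∀ k ∈ S.erase i, 1 ≤ k ∧ k ≤ ts.length := fun k hk => hr k (List.erase_subset hk)
        have hcast : ((done.length : Int) + 1) = (((done ++ [ts.getD (i - 1) 0]).length : Int)) := by
          simp
        rw [hcast, ih _ (S.erase i) _ hg2 hS' hr']
        rw [loopB_acc rest _ _, hval, hpool]
        simp
        rw [loopB_acc rest (List.map f (S.erase i)) [ts[i - 1]?.getD 0]]
        simp

theorem good_init (n : Nat) :
    GoodNA n (List.range (n + 1)) ((List.range n).map (fun k => k + 1)) := by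
  refine ⟨by simp, fun j hj => ?_⟩
  have hget : (List.range (n + 1)).getD j 0 = j := by
    rw [List.getD_eq_getElem _ _ (by simp; omega)]
    simp
  rw [hget]
  refine ⟨le_rfl, rfl, ?_⟩
  simp only [List.mem_map, List.mem_range]
  constructor
  · intro _
    rcases Nat.eq_zero_or_pos j with h | h
    · right; exact h
    · left; exact ⟨j - 1, by omega, by omega⟩
  · intro _; trivial

theorem S0_pairwise (n : Nat) : ((List.range n).map (fun k => k + 1)).Pairwise (· < ·) := by
  rw [List.pairwise_map]
  exact List.pairwise_lt_range.imp (by omega)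

theorem S0_range (n : Nat) : ∀ k ∈ (List.range n).map (fun k => k + 1), 1 ≤ k ∧ k ≤ n := by
  intro k hk
  simp only [List.mem_map, List.mem_range] at hk
  obtain ⟨a, ha, rfl⟩ := hk
  omega

theorem S0_map (ts : List Int) :
    ((List.range ts.length).map (fun k => k + 1)).map (fun k => ts.getD (k - 1) 0) = ts := by
  rw [List.map_map]
  apply List.ext_getElem (by simp)
  intro i h1 h2
  simp only [List.getElem_map, List.getElem_range, Function.comp_apply, Nat.add_sub_cancel]
  rw [List.getD_eq_getElem _ _ h2]

theorem concert_tickets_spec : Claim_equal_concert_tickets := by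
  unfold Claim_equal_concert_tickets
  intro tp mc _
  unfold Spec_concert_tickets concert_tickets concert_tickets_alt
  have hts : (PySem.List.sorted tp (fun x => x)).Pairwise (· ≤ ·) := by
    simpa using PySem.List.sorted_pairwise tp (fun x => x)
  have hmain := loop_eq (PySem.List.sorted tp (fun x => x)) hts mc
    (List.range ((PySem.List.sorted tp (fun x => x)).length + 1))
    ((List.range (PySem.List.sorted tp (fun x => x)).length).map (fun k => k + 1)) []
    (good_init _) (S0_pairwise _) (S0_range _)
  rw [S0_map] at hmain
  simpa using hmain
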